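-- pv_equiv track=rewrite | github.com/DevelopedBy-Siva/code-dna | codedna/server/app.py | _truncate_on_role_marker
-- ===== SOURCE A (Python) =====
-- def _truncate_on_role_marker(text: str) -> str:
--     markers = ("\nuser:", "\nsystem:", "\nassistant:")
--     end = len(text)
--     lowered = text.lower()
--     for marker in markers:
--         index = lowered.find(marker)
--         if index != -1:
--             end = min(end, index)
--     return text[:end].strip()
-- ===== SOURCE B (Python) =====
-- def _truncate_on_role_marker(text: str) -> str:
--     lowered = text.lower()
--     end = len(text)
--     for i, ch in enumerate(lowered):
--         if ch == "\n" and (lowered.startswith("user:", i + 1)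
--                            or lowered.startswith("system:", i + 1)
--                            or lowered.startswith("assistant:", i + 1)):
--             end = i
--             break
--     return text[:end].strip()
-- ===== Notes on version B (the rewrite author's own statement) =====
-- stated objective: alternative
-- what changed: Replaces the three separate lowered.find scans (one full scan per marker, combined with min) by a single left-to-right scan that stops at the first newline followed by any role marker, so the earliest cut point is found in one interleaved pass with early exit.
import Mathlib
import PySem

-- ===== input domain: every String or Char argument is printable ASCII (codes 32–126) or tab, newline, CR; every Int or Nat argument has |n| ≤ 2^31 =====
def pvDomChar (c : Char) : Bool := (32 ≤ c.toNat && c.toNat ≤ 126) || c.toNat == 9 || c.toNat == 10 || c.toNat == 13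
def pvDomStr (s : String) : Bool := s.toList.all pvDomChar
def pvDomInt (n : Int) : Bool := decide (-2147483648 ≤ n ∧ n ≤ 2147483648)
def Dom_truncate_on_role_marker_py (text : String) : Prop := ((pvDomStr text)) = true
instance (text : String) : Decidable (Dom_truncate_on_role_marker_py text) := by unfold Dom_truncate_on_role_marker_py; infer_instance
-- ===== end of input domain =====

-- B replaces A's three whole-string find scans combined with min by one left-to-right
-- scan that stops at the first newline followed by any role marker (alternative decomposition).

-- ===== PORT A =====
def truncate_on_role_marker_py (text : String) : String :=
  let markers : List (List Char) := ["\nuser:".toList, "\nsystem:".toList, "\nassistant:".toList]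
  let lowered := PySem.Chars.lower text.toList
  let e : Int := markers.foldl (fun e marker =>
      let index := PySem.Chars.find lowered marker
      if index ≠ -1 then min e index else e) ((text.toList.length : Int))
  String.ofList (PySem.Chars.strip (PySem.Chars.slice text.toList none (some e)))

-- ===== PORT B =====
def pvMarkerHere (rest : List Char) : Bool :=
  PySem.Chars.startswith rest "user:".toList ||
  PySem.Chars.startswith rest "system:".toList ||
  PySem.Chars.startswith rest "assistant:".toList

def pvScan : List Char → Nat → Option Nat
  | [], _ => none
  | c :: rest, i => if c = '\n' && pvMarkerHere rest then some i else pvScan rest (i + 1)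

def truncate_on_role_marker_py_alt (text : String) : String :=
  let lowered := PySem.Chars.lower text.toList
  let e : Nat := (pvScan lowered 0).getD text.toList.length
  String.ofList (PySem.Chars.strip (List.take e text.toList))

-- ===== PRECONDITION & SPEC =====
def Spec_truncate_on_role_marker_py (text : String) (out : String) : Prop := out = truncate_on_role_marker_py_alt text
instance (text : String) (out : String) : Decidable (Spec_truncate_on_role_marker_py text out) := by unfold Spec_truncate_on_role_marker_py; infer_instance

-- ===== CLAIM (what is proved, stated in full; the proofs are below) =====
def Claim_equal_truncate_on_role_marker_py : Prop := ∀ (text : String), Dom_truncate_on_role_marker_py text → Spec_truncate_on_role_marker_py text (truncate_on_role_marker_py text)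

-- ===== LEMMAS AND PROOFS =====

-- Hit s: some full marker is a prefix of s.
def pvHit (s : List Char) : Prop :=
  "\nuser:".toList <+: s ∨ "\nsystem:".toList <+: s ∨ "\nassistant:".toList <+: s

lemma pvHit_nil : ¬ pvHit [] := by
  simp [pvHit]

lemma pvM1_cons : "\nuser:".toList = '\n' :: "user:".toList := by decide
lemma pvM2_cons : "\nsystem:".toList = '\n' :: "system:".toList := by decide
lemma pvM3_cons : "\nassistant:".toList = '\n' :: "assistant:".toList := by decide

lemma pvCond_iff (c : Char) (rest : List Char) :
    (c = '\n' && pvMarkerHere rest) = true ↔ pvHit (c :: rest) := by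
  simp only [pvMarkerHere, pvHit, pvM1_cons, pvM2_cons, pvM3_cons, Bool.and_eq_true,
    Bool.or_eq_true, decide_eq_true_eq, PySem.Chars.startswith_iff, List.cons_prefix_cons]
  constructor
  · rintro ⟨hc, h⟩; subst hc; tauto
  · intro h; rcases h with ⟨hc, h⟩ | ⟨hc, h⟩ | ⟨hc, h⟩ <;> subst hc <;> exact ⟨rfl, by tauto⟩

lemma pvScan_none_iff (s : List Char) (i : Nat) :
    pvScan s i = none ↔ ∀ j, ¬ pvHit (s.drop j) := by
  induction s generalizing i with
  | nil => simp [pvScan, pvHit_nil]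
  | cons c rest ih =>
    by_cases h : (c = '\n' && pvMarkerHere rest) = true
    · simp only [pvScan, if_pos h]
      constructor
      · intro hc; cases hc
      · intro hall; exact absurd ((pvCond_iff c rest).mp h) (by simpa using hall 0)
    · simp only [pvScan, if_neg h]
      rw [ih]
      constructor
      · intro hall j
        cases j with
        | zero => simpa using fun hh => h ((pvCond_iff c rest).mpr hh)
        | succ j => simpa using hall j
      · intro hall j; simpa using hall (j + 1)

lemma pvScan_some (s : List Char) (i k : Nat) (h : pvScan s i = some k) :
    i ≤ k ∧ pvHit (s.drop (k - i)) ∧ ∀ j, j < k - i → ¬ pvHit (s.drop j) := by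
  induction s generalizing i with
  | nil => simp [pvScan] at h
  | cons c rest ih =>
    by_cases hc : (c = '\n' && pvMarkerHere rest) = true
    · simp only [pvScan, if_pos hc] at h
      cases h
      refine ⟨le_refl _, ?_, ?_⟩
      · simpa using (pvCond_iff c rest).mp hc
      · intro j hj; omega
    · simp only [pvScan, if_neg hc] at h
      obtain ⟨h1, h2, h3⟩ := ih (i + 1) h
      refine ⟨by omega, ?_, ?_⟩
      · have : k - i = (k - (i + 1)) + 1 := by omega
        rw [this]; simpa using h2
      · intro j hj
        cases j with
        | zero => simpa using fun hh => hc ((pvCond_iff c rest).mpr hh)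
        | succ j => have := h3 j (by omega); simpa using this

-- find's spec at start 0
lemma pvFind_spec (s sub : List Char) (h : PySem.Chars.find s sub ≠ -1) :
    0 ≤ PySem.Chars.find s sub ∧ sub <+: s.drop (PySem.Chars.find s sub).toNat ∧
      ∀ j, j < (PySem.Chars.find s sub).toNat → ¬ sub <+: s.drop j := by
  have := PySem.Chars.findFrom_natCast_spec s sub 0 (Nat.zero_le _) (by simpa using h)
  simp only [Nat.cast_zero, PySem.Chars.findFrom_zero] at this
  exact ⟨this.1, this.2.1, fun j hj => this.2.2 j (Nat.zero_le _) hj⟩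

lemma pvFind_eq_neg_one_iff (s sub : List Char) :
    PySem.Chars.find s sub = -1 ↔ ∀ j, ¬ sub <+: s.drop j := by
  rw [PySem.Chars.find_eq_neg_one_iff]
  rw [← PySem.Chars.isIn_iff_infix, ← PySem.Chars.exists_prefix_drop_iff_isIn]
  push_neg
  rfl

lemma pvLower_length (s : List Char) : (PySem.Chars.lower s).length = s.length := by
  simp [PySem.Chars.lower]

-- the two cut points agree
lemma pvEnd_eq (text : String) :
    (let lowered := PySem.Chars.lower text.toList
     (["\nuser:".toList, "\nsystem:".toList, "\nassistant:".toList].foldl (fun e marker =>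
       let index := PySem.Chars.find lowered marker
       if index ≠ -1 then min e index else e) ((text.toList.length : Int))))
    = (((pvScan (PySem.Chars.lower text.toList) 0).getD text.toList.length : Nat) : Int) := by
  set l := PySem.Chars.lower text.toList with hl
  set L := text.toList.length with hL
  have hlen : l.length = L := pvLower_length _
  rw [List.foldl_cons, List.foldl_cons, List.foldl_cons, List.foldl_nil]
  simp only []
  set f1 := PySem.Chars.find l "\nuser:".toList with hf1
  set f2 := PySem.Chars.find l "\nsystem:".toList with hf2
  set f3 := PySem.Chars.find l "\nassistant:".toList with hf3
  cases hscan : pvScan l 0 with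
  | none =>
    have hall := (pvScan_none_iff l 0).mp hscan
    have h1 : f1 = -1 := (pvFind_eq_neg_one_iff _ _).mpr (fun j hp => hall j (Or.inl hp))
    have h2 : f2 = -1 := (pvFind_eq_neg_one_iff _ _).mpr (fun j hp => hall j (Or.inr (Or.inl hp)))
    have h3 : f3 = -1 := (pvFind_eq_neg_one_iff _ _).mpr (fun j hp => hall j (Or.inr (Or.inr hp)))
    simp only [Option.getD]
    split_ifs <;> omega
  | some k =>
    obtain ⟨-, hhit, hmin⟩ := pvScan_some l 0 k hscan
    simp only [Nat.sub_zero] at hhit hmin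
    -- k is below the length: the marker prefix is nonempty
    have hkL : k < L := by
      rcases hhit with hp | hp | hp <;>
      · rcases hp with ⟨t, ht⟩
        have h0 : (l.drop k).length ≠ 0 := by rw [← ht]; simp
        rw [List.length_drop] at h0; omega
    -- every successful find lands at or after k (else pvHit would hold before k)
    have hge : ∀ sub : List Char, (∀ s', sub <+: s' → pvHit s') →
        PySem.Chars.find l sub ≠ -1 → (k : Int) ≤ PySem.Chars.find l sub := by
      intro sub hsub hne
      obtain ⟨hnn, hpre, -⟩ := pvFind_spec l sub hne
      by_contra hlt
      push_neg at hlt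
      exact hmin (PySem.Chars.find l sub).toNat (by omega) (hsub _ hpre)
    -- the marker hitting at k has find ≤ k
    have hle : ∀ sub : List Char, sub <+: l.drop k →
        PySem.Chars.find l sub ≠ -1 ∧ PySem.Chars.find l sub ≤ (k : Int) := by
      intro sub hp
      have hne : PySem.Chars.find l sub ≠ -1 := by
        intro he
        exact (pvFind_eq_neg_one_iff l sub).mp he k hp
      obtain ⟨hnn, -, hminf⟩ := pvFind_spec l sub hne
      refine ⟨hne, ?_⟩
      by_contra hlt
      push_neg at hlt
      exact hminf k (by omega) hp
    have hex : (f1 ≠ -1 ∧ f1 ≤ (k : Int)) ∨ (f2 ≠ -1 ∧ f2 ≤ (k : Int)) ∨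
        (f3 ≠ -1 ∧ f3 ≤ (k : Int)) := by
      rcases hhit with hp | hp | hp
      · exact Or.inl (hle _ hp)
      · exact Or.inr (Or.inl (hle _ hp))
      · exact Or.inr (Or.inr (hle _ hp))
    have hg1 : f1 ≠ -1 → (k : Int) ≤ f1 := hge _ (fun s' hp => Or.inl hp)
    have hg2 : f2 ≠ -1 → (k : Int) ≤ f2 := hge _ (fun s' hp => Or.inr (Or.inl hp))
    have hg3 : f3 ≠ -1 → (k : Int) ≤ f3 := hge _ (fun s' hp => Or.inr (Or.inr hp))
    simp only [Option.getD]
    split_ifs <;> omega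

-- ===== VERDICT (by name: the statement is the Claim_ definition above) =====
theorem truncate_on_role_marker_py_spec : Claim_equal_truncate_on_role_marker_py := by
  intro text _
  unfold Spec_truncate_on_role_marker_py truncate_on_role_marker_py truncate_on_role_marker_py_alt
  have he := pvEnd_eq text
  simp only at he ⊢
  rw [he]
  congr 1
  rw [PySem.Chars.slice_eq_listSlice, PySem.List.slice_to _ (by positivity)]
  simp
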